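-- pv_equiv track=rewrite | github.com/NanoRhino/weight-loss-skill | diet-tracking-analysis/scripts/nutrition-calc.py | _cleanup_calibrations
-- ===== SOURCE A (Python) =====
-- _MAX_CALIBRATIONS = 200
--
-- def _cleanup_calibrations(calibrations: dict) -> dict:
--     """Remove lowest-frequency entries when over limit."""
--     if len(calibrations) <= _MAX_CALIBRATIONS:
--         return calibrations
--     sorted_keys = sorted(calibrations.keys(),
--                          key=lambda k: calibrations[k].get("correction_count", 1))
--     to_remove = len(calibrations) - _MAX_CALIBRATIONS
--     for key in sorted_keys[:to_remove]:
--         del calibrations[key]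
--     return calibrations
-- ===== SOURCE B (Python) =====
-- _MAX_CALIBRATIONS = 200
--
-- def _cleanup_calibrations(calibrations: dict) -> dict:
--     """Remove lowest-frequency entries when over limit (threshold partition, no key sort)."""
--     excess = len(calibrations) - _MAX_CALIBRATIONS
--     if excess <= 0:
--         return calibrations
--     counts = sorted(v.get("correction_count", 1) for v in calibrations.values())
--     threshold = counts[excess - 1]
--     ties_to_drop = excess - sum(1 for c in counts if c < threshold)
--     kept = {}
--     for key, value in calibrations.items():
--         c = value.get("correction_count", 1)
--         if c < threshold:
--             continue
--         if c == threshold and ties_to_drop > 0: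
--             ties_to_drop -= 1
--             continue
--         kept[key] = value
--     calibrations.clear()
--     calibrations.update(kept)
--     return calibrations
-- ===== Notes on version B (the rewrite author's own statement) =====
-- stated objective: alternative
-- what changed: Instead of sorting all keys by frequency and deleting the lowest-frequency prefix one key at a time, B sorts only the list of counts to find the cutoff count, then removes the low entries in a single threshold-partition pass over the dict (dropping all entries below the cutoff and the first surplus ties at the cutoff), rebuilding the kept entries in place.
import Mathlib
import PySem

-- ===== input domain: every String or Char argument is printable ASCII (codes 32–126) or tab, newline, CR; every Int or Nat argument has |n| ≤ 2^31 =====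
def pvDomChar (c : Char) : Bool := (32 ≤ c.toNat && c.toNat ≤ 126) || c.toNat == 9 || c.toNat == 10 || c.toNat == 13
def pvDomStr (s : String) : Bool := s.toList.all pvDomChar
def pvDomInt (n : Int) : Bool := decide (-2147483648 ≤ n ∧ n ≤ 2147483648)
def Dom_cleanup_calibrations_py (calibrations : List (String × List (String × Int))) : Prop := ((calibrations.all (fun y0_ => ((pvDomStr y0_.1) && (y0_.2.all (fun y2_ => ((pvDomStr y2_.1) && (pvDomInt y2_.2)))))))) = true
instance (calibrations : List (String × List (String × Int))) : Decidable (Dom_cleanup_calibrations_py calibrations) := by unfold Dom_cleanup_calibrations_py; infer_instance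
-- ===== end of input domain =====

-- B replaces A's sort of all keys by count with a single-pass threshold partition (only the counts are
-- sorted to find the cutoff) and rebuilds the kept dict in one pass; equivalence is about the returned
-- dict's contents (both Pythons also mutate the argument in place to that same content).

-- v.get("correction_count", 1) — shared by both Pythons verbatim
def pvCnt (v : List (String × Int)) : Int :=
  PySem.Dict.getD (PySem.Dict.mk v) "correction_count" 1

-- ===== PORT A =====
def cleanup_calibrations_py (calibrations : List (String × List (String × Int))) : List (String × List (String × Int)) :=
  if (calibrations.length : Int) ≤ 200 then calibrations
  else
    -- calibrations[k]: k ranges over the dict's own keys, so the lookup never misses and the [] default is never used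
    let sorted_keys := PySem.List.sorted (PySem.Dict.keys (PySem.Dict.mk calibrations))
      (fun k => pvCnt (PySem.Dict.getD (PySem.Dict.mk calibrations) k []))
    let to_remove : Int := (calibrations.length : Int) - 200
    (List.foldl (fun d key => PySem.Dict.erase d key) (PySem.Dict.mk calibrations)
      (PySem.List.slice sorted_keys none (some to_remove))).items

-- ===== PORT B =====
def cleanup_calibrations_py_alt (calibrations : List (String × List (String × Int))) : List (String × List (String × Int)) :=
  let excess : Int := (calibrations.length : Int) - 200
  if excess ≤ 0 then calibrations
  else
    let counts := PySem.List.sorted (calibrations.map (fun kv => pvCnt kv.2)) (fun c => c)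
    -- counts[excess - 1]: in range whenever excess > 0, so the 0 default is never used
    let threshold := PySem.List.pyGetD counts (excess - 1) 0
    let ties0 : Int := excess - (counts.map (fun c => if c < threshold then (1 : Int) else 0)).sum
    (calibrations.foldl
      (fun (st : List (String × List (String × Int)) × Int) kv =>
        let c := pvCnt kv.2
        if c < threshold then st
        else if c = threshold ∧ 0 < st.2 then (st.1, st.2 - 1)
        else (st.1 ++ [kv], st.2))
      ([], ties0)).1

-- ===== PRECONDITION & SPEC =====
-- Pre_ excludes only association lists with duplicate keys, which do not represent a Python dict
-- (the argument of _cleanup_calibrations is a dict, whose keys are necessarily distinct).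
def Pre_cleanup_calibrations_py (calibrations : List (String × List (String × Int))) : Prop :=
  (calibrations.map Prod.fst).Nodup
instance (calibrations : List (String × List (String × Int))) : Decidable (Pre_cleanup_calibrations_py calibrations) := by unfold Pre_cleanup_calibrations_py; infer_instance
def pvWitness_cleanup_calibrations_py : (List (String × List (String × Int))) :=
  [("a", [("correction_count", 2)]), ("b", [])]

def Spec_cleanup_calibrations_py (calibrations : List (String × List (String × Int))) (out : List (String × List (String × Int))) : Prop := out = cleanup_calibrations_py_alt calibrations
instance (calibrations : List (String × List (String × Int))) (out : List (String × List (String × Int))) : Decidable (Spec_cleanup_calibrations_py calibrations out) := by unfold Spec_cleanup_calibrations_py; infer_instance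

-- ===== CLAIM (what is proved, stated in full; the proofs are below) =====
def Claim_equal_cleanup_calibrations_py : Prop := ∀ (calibrations : List (String × List (String × Int))), Dom_cleanup_calibrations_py calibrations → Pre_cleanup_calibrations_py calibrations → Spec_cleanup_calibrations_py calibrations (cleanup_calibrations_py calibrations)

-- ===== LEMMAS AND PROOFS =====

-- first-match lookup in an association list with distinct keys finds each pair's own value
theorem pv_assoc_get {d : List (String × List (String × Int))}
    (h : (d.map Prod.fst).Nodup) {kv : String × List (String × Int)} (hkv : kv ∈ d) :
    PySem.Dict.get? (PySem.Dict.mk d) kv.1 = some kv.2 := by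
  induction d with
  | nil => cases hkv
  | cons p rest ih =>
    simp only [List.map_cons, List.nodup_cons] at h
    rcases List.mem_cons.mp hkv with rfl | hmem
    · simp [PySem.Dict.get?, List.find?]
    · have hne : p.1 ≠ kv.1 := by
        intro he
        exact h.1 (he ▸ (List.mem_map.mpr ⟨kv, hmem, rfl⟩))
      have := ih h.2 hmem
      simp only [PySem.Dict.get?, List.find?] at this ⊢
      rw [show (p.1 == kv.1) = false from beq_eq_false_iff_ne.mpr hne]
      exact this

-- insertBy (one step of Python's stable sort) preserves sortedness by the key
theorem pv_insertBy_pairwise {α : Type} (key : α → Int) (x : α) (acc : List α)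
    (h : List.Pairwise (fun a b => key a ≤ key b) acc) :
    List.Pairwise (fun a b => key a ≤ key b)
      (PySem.List.insertBy (fun a b => decide (key a < key b)) x acc) := by
  induction acc with
  | nil => simp [PySem.List.insertBy]
  | cons y ys ih =>
    rw [List.pairwise_cons] at h
    by_cases hxy : key x < key y
    · simp only [PySem.List.insertBy, hxy, decide_true, if_true]
      refine List.pairwise_cons.mpr ⟨?_, List.pairwise_cons.mpr h⟩
      intro z hz
      rcases List.mem_cons.mp hz with rfl | hz
      · omega
      · have := h.1 z hz; omega
    · simp only [PySem.List.insertBy, hxy, decide_false, Bool.false_eq_true, if_false]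
      refine List.pairwise_cons.mpr ⟨?_, ih h.2⟩
      intro z hz
      rcases (PySem.List.mem_insertBy _ _ _ _).mp hz with rfl | hz
      · omega
      · exact h.1 z hz

-- stability step: inserting into a sorted list appends to the end of its equal-key class
theorem pv_filter_insertBy {α : Type} (key : α → Int) (c : Int) (x : α) (acc : List α)
    (h : List.Pairwise (fun a b => key a ≤ key b) acc) :
    (PySem.List.insertBy (fun a b => decide (key a < key b)) x acc).filter
        (fun y => decide (key y = c)) =
      acc.filter (fun y => decide (key y = c)) ++ (if key x = c then [x] else []) := by
  induction acc with
  | nil => by_cases hc : key x = c <;> simp [PySem.List.insertBy, hc]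
  | cons y ys ih =>
    rw [List.pairwise_cons] at h
    by_cases hxy : key x < key y
    · simp only [PySem.List.insertBy, hxy, decide_true, if_true]
      by_cases hc : key x = c
      · have hnil : (y :: ys).filter (fun y => decide (key y = c)) = [] := by
          apply List.filter_eq_nil_iff.mpr
          intro z hz
          have : key y ≤ key z := by
            rcases List.mem_cons.mp hz with rfl | hz
            · omega
            · exact h.1 z hz
          simp only [decide_eq_true_eq]
          omega
        rw [List.filter_cons]
        simp [hc, hnil]
      · rw [List.filter_cons]
        simp [hc]
    · simp only [PySem.List.insertBy, hxy, decide_false, Bool.false_eq_true, if_false]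
      rw [List.filter_cons, List.filter_cons, ih h.2]
      by_cases hy : key y = c <;> simp [hy]

theorem pv_filter_foldl_insertBy {α : Type} (key : α → Int) (c : Int) (xs acc : List α)
    (h : List.Pairwise (fun a b => key a ≤ key b) acc) :
    ((xs.foldl (fun acc x => PySem.List.insertBy (fun a b => decide (key a < key b)) x acc) acc).filter
        (fun y => decide (key y = c))) =
      acc.filter (fun y => decide (key y = c)) ++ xs.filter (fun y => decide (key y = c)) := by
  induction xs generalizing acc with
  | nil => simp
  | cons x xs ih =>
    rw [List.foldl_cons, ih _ (pv_insertBy_pairwise key x acc h),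
        pv_filter_insertBy key c x acc h, List.filter_cons]
    by_cases hc : key x = c <;> simp [hc]

-- STABILITY of Python's sort: the elements of one key class come out in input order
theorem pv_sorted_filter_eq {α : Type} (key : α → Int) (c : Int) (xs : List α) :
    (PySem.List.sorted xs key).filter (fun y => decide (key y = c)) =
      xs.filter (fun y => decide (key y = c)) := by
  rw [PySem.List.sorted_eq_foldl_insertBy, pv_filter_foldl_insertBy key c xs [] (by simp)]
  simp

-- a sorted list splits into its <t, =t, >t classes, in that order
theorem pv_sorted_split {α : Type} (key : α → Int) (t : Int) (l : List α)
    (h : List.Pairwise (fun a b => key a ≤ key b) l) :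
    l = l.filter (fun y => decide (key y < t)) ++ l.filter (fun y => decide (key y = t)) ++
        l.filter (fun y => decide (t < key y)) := by
  induction l with
  | nil => simp
  | cons x xs ih =>
    rw [List.pairwise_cons] at h
    have ihx := ih h.2
    rcases lt_trichotomy (key x) t with hx | hx | hx
    · rw [List.filter_cons, List.filter_cons, List.filter_cons]
      simp only [hx, decide_true, if_true]
      rw [show decide (key x = t) = false by simp; omega,
          show decide (t < key x) = false by simp; omega]
      simp only [if_false, Bool.false_eq_true]
      rw [List.cons_append, List.cons_append]
      exact congrArg (x :: ·) ihx
    · have hlow : xs.filter (fun y => decide (key y < t)) = [] := by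
        apply List.filter_eq_nil_iff.mpr
        intro z hz
        have := h.1 z hz
        simp only [decide_eq_true_eq]; omega
      have hlow' : (x :: xs).filter (fun y => decide (key y < t)) = [] := by
        rw [List.filter_cons]
        simp only [show decide (key x < t) = false by simp; omega, Bool.false_eq_true, if_false]
        exact hlow
      rw [hlow', List.filter_cons, List.filter_cons]
      simp only [show decide (key x = t) = true by simp [hx], if_true]
      rw [show decide (t < key x) = false by simp; omega]
      simp only [Bool.false_eq_true, if_false, List.nil_append]
      rw [List.cons_append]
      refine congrArg (x :: ·) ?_
      calc xs = _ := ihx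
        _ = _ := by rw [hlow]; simp
    · have hlow : xs.filter (fun y => decide (key y < t)) = [] := by
        apply List.filter_eq_nil_iff.mpr
        intro z hz
        have := h.1 z hz
        simp only [decide_eq_true_eq]; omega
      have heq : xs.filter (fun y => decide (key y = t)) = [] := by
        apply List.filter_eq_nil_iff.mpr
        intro z hz
        have := h.1 z hz
        simp only [decide_eq_true_eq]; omega
      have hlow' : (x :: xs).filter (fun y => decide (key y < t)) = [] := by
        rw [List.filter_cons]
        simp only [show decide (key x < t) = false by simp; omega, Bool.false_eq_true, if_false]
        exact hlow
      have heq' : (x :: xs).filter (fun y => decide (key y = t)) = [] := by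
        rw [List.filter_cons]
        simp only [show decide (key x = t) = false by simp; omega, Bool.false_eq_true, if_false]
        exact heq
      rw [hlow', heq', List.filter_cons]
      simp only [show decide (t < key x) = true by simp [hx], if_true, List.nil_append]
      refine congrArg (x :: ·) ?_
      calc xs = _ := ih h.2
        _ = _ := by rw [hlow, heq]; simp

-- the first r elements of a sorted list: the whole <t class plus the first surplus of the =t class
theorem pv_take_sorted {α : Type} {t : Int} (key : α → Int) (l : List α) (r : Nat)
    (h : List.Pairwise (fun a b => key a ≤ key b) l)
    (hr1 : 1 ≤ r) (hr : r ≤ l.length) (hi : r - 1 < l.length) (ht : key (l[r - 1]'hi) = t) :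
    l.countP (fun y => decide (key y < t)) ≤ r ∧
    l.take r = l.filter (fun y => decide (key y < t)) ++
        (l.filter (fun y => decide (key y = t))).take (r - l.countP (fun y => decide (key y < t))) := by
  set A := l.filter (fun y => decide (key y < t)) with hA
  set B := l.filter (fun y => decide (key y = t)) with hB
  set C := l.filter (fun y => decide (t < key y)) with hC
  have hsplit : l = A ++ B ++ C := pv_sorted_split key t l h
  have hcount : l.countP (fun y => decide (key y < t)) = A.length := List.countP_eq_length_filter
  have h1 : A.length ≤ r := by
    by_contra hcon
    have hlt : r - 1 < A.length := by omega
    have heq : l[r - 1]'hi = A[r - 1]'hlt := by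
      rw [List.getElem_of_eq hsplit, List.getElem_append_left (by simp; omega),
          List.getElem_append_left hlt]
    have hmem : (A[r - 1]'hlt) ∈ A := List.getElem_mem _
    have hk := (List.mem_filter.mp hmem).2
    rw [heq] at ht
    simp only [decide_eq_true_eq] at hk
    omega
  have hlen : l.length = A.length + B.length + C.length := by
    rw [hsplit]; simp; omega
  have h2 : r ≤ A.length + B.length := by
    by_contra hcon
    have hlt2 : r - 1 - (A ++ B).length < C.length := by simp; omega
    have heq : l[r - 1]'hi = C[r - 1 - (A ++ B).length]'hlt2 := by
      rw [List.getElem_of_eq hsplit, List.getElem_append_right (by simp; omega)]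
    have hmem : (C[r - 1 - (A ++ B).length]'hlt2) ∈ C := List.getElem_mem _
    have hk := (List.mem_filter.mp hmem).2
    rw [heq] at ht
    simp only [decide_eq_true_eq] at hk
    omega
  refine ⟨by omega, ?_⟩
  rw [hcount]
  conv_lhs => rw [hsplit]
  rw [List.append_assoc, List.take_append, List.take_of_length_le h1, List.take_append,
      show r - A.length - B.length = 0 by omega, List.take_zero, List.append_nil]

-- A's deletion loop is one filter by the removed-key set
theorem pv_foldl_erase (R : List String) (d : List (String × List (String × Int))) :
    (List.foldl (fun d key => PySem.Dict.erase d key) (PySem.Dict.mk d) R).items =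
      d.filter (fun kv => decide (kv.1 ∉ R)) := by
  induction R generalizing d with
  | nil => simp
  | cons k R ih =>
    rw [List.foldl_cons]
    have : PySem.Dict.erase (PySem.Dict.mk d) k =
        PySem.Dict.mk (d.filter (fun p => !(p.1 == k))) := rfl
    rw [this, ih, List.filter_filter]
    apply List.filter_congr
    intro kv _
    by_cases h1 : kv.1 = k <;> by_cases h2 : kv.1 ∈ R <;>
      simp [h1, h2, List.mem_cons]

-- common recursive form of "drop everything below t and the first q ties at t" (proof-only helper)
def pvDropLows (t : Int) : Int → List (String × List (String × Int)) → List (String × List (String × Int))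
  | _, [] => []
  | q, kv :: rest =>
    if pvCnt kv.2 < t then pvDropLows t q rest
    else if pvCnt kv.2 = t ∧ 0 < q then pvDropLows t (q - 1) rest
    else kv :: pvDropLows t q rest

-- B's single pass computes pvDropLows
theorem pv_foldl_dropLows (t : Int) (l : List (String × List (String × Int)))
    (q : Int) (acc : List (String × List (String × Int))) :
    (l.foldl
      (fun (st : List (String × List (String × Int)) × Int) kv =>
        let c := pvCnt kv.2
        if c < t then st
        else if c = t ∧ 0 < st.2 then (st.1, st.2 - 1)
        else (st.1 ++ [kv], st.2))
      (acc, q)).1 = acc ++ pvDropLows t q l := by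
  induction l generalizing q acc with
  | nil => simp [pvDropLows]
  | cons kv rest ih =>
    rw [List.foldl_cons]
    simp only [pvDropLows]
    split_ifs with h1 h2
    · exact ih q acc
    · exact ih (q - 1) acc
    · rw [ih]
      simp

-- A's filter by the removed-key set computes pvDropLows too (keys distinct)
theorem pv_filter_dropLows (t : Int) (l : List (String × List (String × Int)))
    (h : (l.map Prod.fst).Nodup) (q : Int) :
    l.filter (fun kv => decide (¬ pvCnt kv.2 < t ∧ kv.1 ∉
        ((l.filter (fun kv' => decide (pvCnt kv'.2 = t))).map Prod.fst).take q.toNat)) =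
      pvDropLows t q l := by
  induction l generalizing q with
  | nil => simp [pvDropLows]
  | cons kv rest ih =>
    simp only [List.map_cons, List.nodup_cons] at h
    have hnotin :
        ∀ x ∈ ((rest.filter (fun kv' => decide (pvCnt kv'.2 = t))).map Prod.fst), x ∈ rest.map Prod.fst := by
      intro x hx
      rcases List.mem_map.mp hx with ⟨p, hp, rfl⟩
      exact List.mem_map.mpr ⟨p, (List.mem_filter.mp hp).1, rfl⟩
    have hne : ∀ kv' ∈ rest, kv'.1 ≠ kv.1 := by
      intro kv' hkv' he
      exact h.1 (he ▸ List.mem_map.mpr ⟨kv', hkv', rfl⟩)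
    rcases lt_trichotomy (pvCnt kv.2) t with hlow | htie | hhigh
    · rw [pvDropLows, if_pos hlow]
      rw [List.filter_cons_of_neg (by simp [hlow]),
          List.filter_cons_of_neg (by simp; omega)]
      exact ih h.2 q
    · have hinner : (kv :: rest).filter (fun kv' => decide (pvCnt kv'.2 = t)) =
          kv :: rest.filter (fun kv' => decide (pvCnt kv'.2 = t)) :=
        List.filter_cons_of_pos (by simp [htie])
      rw [pvDropLows, if_neg (by omega), hinner, List.map_cons]
      by_cases hq : 0 < q
      · rw [if_pos ⟨htie, hq⟩,
            show q.toNat = (q - 1).toNat + 1 by omega, List.take_succ_cons,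
            List.filter_cons_of_neg (by simp)]
        rw [← ih h.2 (q - 1)]
        apply List.filter_congr
        intro kv' hkv'
        have hne' : kv'.1 ≠ kv.1 := hne kv' hkv'
        simp only [decide_eq_decide, List.mem_cons, not_or]
        constructor
        · rintro ⟨ha, _, hb⟩; exact ⟨ha, hb⟩
        · rintro ⟨ha, hb⟩; exact ⟨ha, hne', hb⟩
      · rw [if_neg (by omega)]
        have hz : q.toNat = 0 := by omega
        rw [hz, List.take_zero, List.filter_cons_of_pos (by simp; omega)]
        refine congrArg (kv :: ·) ?_
        rw [← ih h.2 q]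
        apply List.filter_congr
        intro kv' hkv'
        simp [hz]
    · have hinner : (kv :: rest).filter (fun kv' => decide (pvCnt kv'.2 = t)) =
          rest.filter (fun kv' => decide (pvCnt kv'.2 = t)) :=
        List.filter_cons_of_neg (by simp; omega)
      rw [pvDropLows, if_neg (by omega), if_neg (by omega), hinner,
          List.filter_cons_of_pos ?_]
      · exact congrArg (kv :: ·) (ih h.2 q)
      · simp only [decide_eq_true_eq]
        refine ⟨by omega, fun hc => ?_⟩
        exact h.1 (hnotin _ (List.take_subset _ _ hc))


-- ===== VERDICT (by name: the statement is the Claim_ definition above) =====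
set_option maxRecDepth 4096 in
theorem cleanup_calibrations_py_spec : Claim_equal_cleanup_calibrations_py := by
  intro d _ hpre
  unfold Spec_cleanup_calibrations_py
  have hnd : (d.map Prod.fst).Nodup := hpre
  by_cases hle : (d.length : Int) ≤ 200
  · simp only [cleanup_calibrations_py, cleanup_calibrations_py_alt]
    rw [if_pos hle, if_pos (by omega)]
  · simp only [cleanup_calibrations_py, cleanup_calibrations_py_alt]
    rw [if_neg hle, if_neg (by omega)]
    have h200 : 200 < d.length := by exact_mod_cast (by omega : (200:Int) < (d.length:Int))
    have hkeys : PySem.Dict.keys (PySem.Dict.mk d) = d.map Prod.fst := rfl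
    rw [hkeys]
    set keyf : String → Int := fun k => pvCnt (PySem.Dict.getD (PySem.Dict.mk d) k []) with hkeyf
    set ks : List String := d.map Prod.fst with hks
    set s : List String := PySem.List.sorted ks keyf with hsdef
    have hKF : ∀ kv ∈ d, keyf kv.1 = pvCnt kv.2 := by
      intro kv hkv
      simp only [hkeyf, PySem.Dict.getD, pv_assoc_get hnd hkv, Option.getD_some]
    have hsperm : s.Perm ks := PySem.List.sorted_perm ks keyf false
    have hslen : s.length = d.length := by
      rw [hsperm.length_eq, hks, List.length_map]
    have hpair : List.Pairwise (fun a b => keyf a ≤ keyf b) s := PySem.List.sorted_pairwise ks keyf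
    have hmapc : d.map (fun kv => pvCnt kv.2) = ks.map keyf := by
      rw [hks, List.map_map]
      exact List.map_congr_left (fun kv hkv => (hKF kv hkv).symm)
    have hsorted1 : List.Pairwise (· ≤ ·) (PySem.List.sorted (ks.map keyf) (fun c => c)) := by
      have h1 := PySem.List.sorted_pairwise (ks.map keyf) (fun c : Int => c)
      simpa using h1
    have hsorted2 : List.Pairwise (· ≤ ·) (s.map keyf) := List.pairwise_map.mpr hpair
    have hcounts : PySem.List.sorted (d.map (fun kv => pvCnt kv.2)) (fun c => c) = s.map keyf := by
      rw [hmapc]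
      exact List.Perm.eq_of_pairwise (fun a b _ _ h1 h2 => le_antisymm h1 h2)
        hsorted1 hsorted2
        ((PySem.List.sorted_perm (ks.map keyf) (fun c => c) false).trans (hsperm.map keyf).symm)
    rw [hcounts]
    set r : Nat := d.length - 200 with hrdef
    have hslice : PySem.List.slice s none (some ((d.length : Int) - 200)) = s.take r := by
      rw [PySem.List.slice_to s (by omega),
          show ((d.length : Int) - 200).toNat = r from by omega]
    rw [hslice]
    have hr1 : 1 ≤ r := by omega
    have hr : r ≤ s.length := by omega
    have hi : r - 1 < s.length := by omega
    set t : Int := keyf (s[r-1]'hi) with htdef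
    have hidx : PySem.List.pyGetD (s.map keyf) ((d.length:Int) - 200 - 1) 0 = t := by
      rw [PySem.List.pyGetD_eq_getElem (s.map keyf) 0 (by omega) (by simp [hslen])]
      rw [List.getElem_map]
      exact congrArg keyf (getElem_congr (rfl : s = s)
        (by omega : ((d.length:Int) - 200 - 1).toNat = r - 1) (by omega))
    rw [hidx]
    obtain ⟨hcle, htake⟩ := pv_take_sorted keyf s r hpair hr1 hr hi rfl
    set cntP : Nat := s.countP (fun y => decide (keyf y < t)) with hcntP
    have hsum : ((s.map keyf).map (fun c => if c < t then (1:Int) else 0)).sum = (cntP : Int) := by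
      rw [List.map_map]
      have h1 := PySem.List.sum_map_ite_one_zero (fun y => decide (keyf y < t)) s
      simp only [decide_eq_true_eq] at h1
      simpa [Function.comp] using h1
    rw [hsum]
    set qI : Int := (d.length:Int) - 200 - (cntP : Int) with hqI
    rw [pv_foldl_erase (s.take r) d, pv_foldl_dropLows t d qI [], List.nil_append,
        ← pv_filter_dropLows t d hnd qI]
    have hq' : qI.toNat = r - cntP := by omega
    have hstab : s.filter (fun y => decide (keyf y = t)) =
        (d.filter (fun kv' => decide (pvCnt kv'.2 = t))).map Prod.fst := by
      rw [hsdef, pv_sorted_filter_eq keyf t ks, hks, List.filter_map]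
      congr 1
      apply List.filter_congr
      intro kv' hkv'
      simp only [Function.comp_apply, decide_eq_decide]
      rw [hKF kv' hkv']
    apply List.filter_congr
    intro kv hkv
    have hkmem : kv.1 ∈ ks := hks ▸ List.mem_map.mpr ⟨kv, hkv, rfl⟩
    have hmem_low : kv.1 ∈ s.filter (fun y => decide (keyf y < t)) ↔ pvCnt kv.2 < t := by
      rw [List.mem_filter]
      simp [hsperm.mem_iff, hkmem, hKF kv hkv]
    rw [htake, hq', hstab]
    simp only [decide_eq_decide, List.mem_append, not_or]
    exact and_congr (not_congr hmem_low) Iff.rfl
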